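-- pv_equiv track=rewrite | github.com/boostcampaitech4lv23nlp1/final-project-level3-nlp-01 | app/question_generation/t5_pipeline.py | _prepare_inputs_for_qg_from_answers_hl
-- ===== SOURCE A (Python) =====
-- def _prepare_inputs_for_qg_from_answers_hl(sents, answers):
--     inputs = []
--     for answer in answers:
--         idx, answer_text = answer[0], answer[1]
--
--         sent = sents[idx]
--         sents_copy = sents[:]
--
--         answer_text = answer_text.strip()
--         if answer_text not in sent:
--             continue
--
--         ans_start_idx = sent.index(answer_text)
--
--         sent = f"{sent[:ans_start_idx]} <hl> {answer_text} <hl> {sent[ans_start_idx + len(answer_text): ]}"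
--         sents_copy[idx] = sent
--
--         source_text = " ".join(sents_copy)
--         source_text = f"generate question: {source_text}"
--         source_text = source_text + " </s>"
--         inputs.append({"answer": answer_text, "source_text": source_text})
--
--     return inputs
-- ===== SOURCE B (Python) =====
-- def _prepare_inputs_for_qg_from_answers_hl(sents, answers):
--     # Join all sentences once and record each sentence's character offset in the
--     # joined string; each source text is then built by splicing the highlight
--     # into two slices of the precomputed join (no per-answer list copy / re-join).
--     full = " ".join(sents)
--     starts = []
--     off = 0
--     for s in sents:
--         starts.append(off)
--         off += len(s) + 1
--     inputs = []
--     for idx, answer_text in answers: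
--         sent = sents[idx]
--         a = answer_text.strip()
--         j = sent.find(a)
--         if j == -1:
--             continue
--         p = starts[idx] + j
--         inputs.append({
--             "answer": a,
--             "source_text": "generate question: " + full[:p] + " <hl> " + a + " <hl> "
--                            + full[p + len(a):] + " </s>",
--         })
--     return inputs
-- ===== Notes on version B (the rewrite author's own statement) =====
-- stated objective: faster
-- what changed: Instead of copying the whole sentence list and re-joining it for every answer, B joins the sentences once, records each sentence's character offset in that joined string, and builds every source text by splicing the highlight markers into two slices of the precomputed join; answers whose text is absent are rejected before any O(n) work.
import Mathlib
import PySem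

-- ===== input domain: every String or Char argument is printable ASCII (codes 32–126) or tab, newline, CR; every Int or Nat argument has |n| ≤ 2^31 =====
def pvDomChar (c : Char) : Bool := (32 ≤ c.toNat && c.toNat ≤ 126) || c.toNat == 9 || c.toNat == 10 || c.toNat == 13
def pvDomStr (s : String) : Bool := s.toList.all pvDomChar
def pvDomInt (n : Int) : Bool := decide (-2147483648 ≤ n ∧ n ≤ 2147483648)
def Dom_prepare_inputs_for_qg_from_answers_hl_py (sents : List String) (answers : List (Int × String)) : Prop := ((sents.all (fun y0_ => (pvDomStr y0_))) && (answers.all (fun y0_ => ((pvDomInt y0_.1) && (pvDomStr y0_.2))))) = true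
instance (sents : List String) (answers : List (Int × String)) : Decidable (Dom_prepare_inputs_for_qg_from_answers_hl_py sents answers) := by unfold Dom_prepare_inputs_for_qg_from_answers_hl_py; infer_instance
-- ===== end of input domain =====

-- B replaces A's per-answer list copy + full re-join by one precomputed join with
-- per-sentence character offsets, splicing each highlight into two slices of it; return value proved equal.

-- ===== PORT A =====
-- one iteration of A's 'for answer in answers' loop
def pvAStep (sents : List String) (inputs : List (List (String × String))) (answer : Int × String) : List (List (String × String)) :=
  let idx : Int := answer.1
  let sent := PySem.List.pyGetD sents idx ""          -- sents[idx]; total under Pre_ (InRange)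
  let answer_text := PySem.Str.strip answer.2
  if PySem.Str.isIn answer_text sent = false then inputs   -- 'if answer_text not in sent: continue'
  else
    let ans_start_idx : Int := PySem.Str.find sent answer_text   -- sent.index(answer_text); ≥ 0 under the guard
    let sent2 := PySem.Str.slice sent none (some ans_start_idx) ++ " <hl> " ++ answer_text ++ " <hl> " ++
                 PySem.Str.slice sent (some (ans_start_idx + PySem.Str.len answer_text)) none
    let sents_copy := PySem.List.pySetD sents idx sent2         -- sents_copy = sents[:]; sents_copy[idx] = sent
    let source_text := PySem.Str.join " " sents_copy
    let source_text := "generate question: " ++ source_text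
    let source_text := source_text ++ " </s>"
    inputs ++ [[("answer", answer_text), ("source_text", source_text)]]

def prepare_inputs_for_qg_from_answers_hl_py (sents : List String) (answers : List (Int × String)) : List (List (String × String)) :=
  answers.foldl (pvAStep sents) []

-- ===== PORT B =====
-- B's offset pass: starts[i] = character offset of sents[i] in " ".join(sents)
def pvStarts (sents : List String) : List Int :=
  (sents.foldl (fun (st : List Int × Int) s => (st.1 ++ [st.2], st.2 + PySem.Str.len s + 1)) (([] : List Int), 0)).1

-- one iteration of B's 'for idx, answer_text in answers' loop
def pvBStep (sents : List String) (full : String) (starts : List Int) (inputs : List (List (String × String))) (answer : Int × String) : List (List (String × String)) :=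
  let idx : Int := answer.1
  let sent := PySem.List.pyGetD sents idx ""
  let a := PySem.Str.strip answer.2
  let j : Int := PySem.Str.find sent a
  if j = -1 then inputs
  else
    let p : Int := PySem.List.pyGetD starts idx 0 + j
    inputs ++ [[("answer", a),
                ("source_text", "generate question: " ++ PySem.Str.slice full none (some p) ++ " <hl> " ++ a ++ " <hl> " ++
                                PySem.Str.slice full (some (p + PySem.Str.len a)) none ++ " </s>")]]

def prepare_inputs_for_qg_from_answers_hl_py_alt (sents : List String) (answers : List (Int × String)) : List (List (String × String)) :=
  answers.foldl (pvBStep sents (PySem.Str.join " " sents) (pvStarts sents)) []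

-- ===== PRECONDITION & SPEC =====
-- Pre_ excludes exactly the inputs where A raises IndexError: some answer index out of Python range for sents.
def Pre_prepare_inputs_for_qg_from_answers_hl_py (sents : List String) (answers : List (Int × String)) : Prop :=
  ∀ p ∈ answers, -(sents.length : Int) ≤ p.1 ∧ p.1 < (sents.length : Int)
instance (sents : List String) (answers : List (Int × String)) : Decidable (Pre_prepare_inputs_for_qg_from_answers_hl_py sents answers) := by unfold Pre_prepare_inputs_for_qg_from_answers_hl_py; infer_instance

def pvWitness_prepare_inputs_for_qg_from_answers_hl_py : List String × (List (Int × String)) :=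
  (["a b.", "c d."], [(0, " b"), (-1, "c"), (1, "zz")])

def Spec_prepare_inputs_for_qg_from_answers_hl_py (sents : List String) (answers : List (Int × String)) (out : List (List (String × String))) : Prop := out = prepare_inputs_for_qg_from_answers_hl_py_alt sents answers
instance (sents : List String) (answers : List (Int × String)) (out : List (List (String × String))) : Decidable (Spec_prepare_inputs_for_qg_from_answers_hl_py sents answers out) := by unfold Spec_prepare_inputs_for_qg_from_answers_hl_py; infer_instance

-- ===== CLAIM (what is proved, stated in full; the proofs are below) =====
def Claim_equal_prepare_inputs_for_qg_from_answers_hl_py : Prop := ∀ (sents : List String) (answers : List (Int × String)), Dom_prepare_inputs_for_qg_from_answers_hl_py sents answers → Pre_prepare_inputs_for_qg_from_answers_hl_py sents answers → Spec_prepare_inputs_for_qg_from_answers_hl_py sents answers (prepare_inputs_for_qg_from_answers_hl_py sents answers)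

-- ===== LEMMAS AND PROOFS =====

-- normalized Python index
theorem pvIdx_norm (n : Nat) (i : Int) (h1 : -(n : Int) ≤ i) (h2 : i < (n : Int)) :
    ∃ j : Nat, j < n ∧ PySem.List.pyIdx? n i = some j := by
  unfold PySem.List.pyIdx?
  by_cases h0 : 0 ≤ i
  · exact ⟨i.toNat, by omega, by simp [h0, h2]⟩
  · refine ⟨n - (-i).toNat, by omega, ?_⟩
    simp [h0, h1]

theorem pvGetD_norm {α : Type} (xs : List α) (i : Int) (d : α) (j : Nat)
    (hj : PySem.List.pyIdx? xs.length i = some j) (hlt : j < xs.length) :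
    PySem.List.pyGetD xs i d = xs[j] := by
  unfold PySem.List.pyGetD PySem.List.pyGet?
  simp [hj, List.getElem?_eq_getElem hlt]

theorem pvSetD_norm {α : Type} (xs : List α) (i : Int) (v : α) (j : Nat)
    (hj : PySem.List.pyIdx? xs.length i = some j) :
    PySem.List.pySetD xs i v = xs.set j v := by
  unfold PySem.List.pySetD PySem.List.pySet?
  simp [hj]

-- string extensionality through toList
theorem pvStrExt {s t : String} (h : s.toList = t.toList) : s = t := String.toList_inj.mp h

-- prefix-accumulator: preAcc l = l.foldl (· ++ · ++ " ") ""
def pvPreAcc (l : List String) : String := l.foldl (fun a s => a ++ s ++ " ") ""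

theorem pvPreAcc_from (l : List String) : ∀ a : String,
    l.foldl (fun x s => x ++ s ++ " ") a = a ++ pvPreAcc l := by
  induction l with
  | nil => intro a; simp [pvPreAcc]
  | cons s t ih =>
      intro a
      show t.foldl _ (a ++ s ++ " ") = _
      rw [ih (a ++ s ++ " ")]
      have : pvPreAcc (s :: t) = (s ++ " ") ++ pvPreAcc t := by
        show t.foldl _ ("" ++ s ++ " ") = _
        rw [ih ("" ++ s ++ " ")]
        simp [String.empty_append]
      rw [this]
      simp [String.append_assoc]

theorem pvPreAcc_cons (s : String) (t : List String) :
    pvPreAcc (s :: t) = s ++ " " ++ pvPreAcc t := by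
  show t.foldl _ ("" ++ s ++ " ") = _
  rw [pvPreAcc_from t ("" ++ s ++ " ")]
  simp [String.empty_append, String.append_assoc]

-- suffix-accumulator: sufF a m = foldr (" " ++ · ++ ·) a m
def pvSufF (a : String) (m : List String) : String := m.foldr (fun s x => " " ++ s ++ x) a

-- the offsets fold: init-prefix homomorphism, length and elementwise value
theorem pvStartsFold_shift (l : List String) : ∀ (init : List Int) (a : Int),
    (l.foldl (fun (st : List Int × Int) s => (st.1 ++ [st.2], st.2 + PySem.Str.len s + 1)) (init, a)).1
      = init ++ (l.foldl (fun (st : List Int × Int) s => (st.1 ++ [st.2], st.2 + PySem.Str.len s + 1)) (([] : List Int), a)).1 := by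
  induction l with
  | nil => intro init a; simp
  | cons s t ih =>
      intro init a
      show (t.foldl _ (init ++ [a], a + PySem.Str.len s + 1)).1 = init ++ (t.foldl _ (([] : List Int) ++ [a], a + PySem.Str.len s + 1)).1
      rw [ih (init ++ [a]), ih ([] ++ [a])]
      simp

theorem pvStartsFold_len (l : List String) : ∀ (init : List Int) (a : Int),
    ((l.foldl (fun (st : List Int × Int) s => (st.1 ++ [st.2], st.2 + PySem.Str.len s + 1)) (init, a)).1).length
      = init.length + l.length := by
  induction l with
  | nil => intro init a; simp
  | cons s t ih =>
      intro init a
      show ((t.foldl _ (init ++ [a], a + PySem.Str.len s + 1)).1).length = _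
      rw [ih (init ++ [a])]
      simp; omega

theorem pvStartsFold_get (l : List String) : ∀ (a : Int) (k : Nat), k < l.length →
    ((l.foldl (fun (st : List Int × Int) s => (st.1 ++ [st.2], st.2 + PySem.Str.len s + 1)) (([] : List Int), a)).1)[k]?
      = some (a + ((pvPreAcc (l.take k)).toList.length : Int)) := by
  induction l with
  | nil => intro a k hk; simp at hk
  | cons s t ih =>
      intro a k hk
      show ((t.foldl _ (([] : List Int) ++ [a], a + PySem.Str.len s + 1)).1)[k]? = _
      rw [pvStartsFold_shift t ([] ++ [a]) (a + PySem.Str.len s + 1)]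
      cases k with
      | zero => simp [pvPreAcc]
      | succ k =>
          simp only [List.nil_append, List.getElem?_append_right (by simp : ([a] : List Int).length ≤ k + 1)]
          simp only [List.length_cons] at hk
          rw [show k + 1 - ([a] : List Int).length = k by simp]
          rw [ih (a + PySem.Str.len s + 1) k (by omega)]
          rw [List.take_succ_cons, pvPreAcc_cons]
          simp only [PySem.Str.len_eq, String.toList_append, List.length_append]
          congr 1
          have h1 : (" ".toList).length = 1 := rfl
          rw [h1]
          push_cast
          ring

theorem pvStarts_len (sents : List String) : (pvStarts sents).length = sents.length := by
  unfold pvStarts; rw [pvStartsFold_len]; simp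

theorem pvStarts_get (sents : List String) (j : Nat) (hj : j < sents.length) :
    (pvStarts sents)[j]? = some ((pvPreAcc (sents.take j)).toList.length : Int) := by
  unfold pvStarts
  rw [pvStartsFold_get sents 0 j hj]
  simp

-- join splits as prefix-accumulator ++ element ++ suffix-accumulator
theorem pvJoin_cons (y : String) (t : List String) :
    PySem.Str.join " " (y :: t) = y ++ pvSufF "" t := by
  induction t generalizing y with
  | nil =>
      apply pvStrExt
      simp [PySem.Str.toList_join, PySem.Chars.join_singleton, pvSufF, String.append_empty]
  | cons z r ih =>
      apply pvStrExt
      have h1 : (PySem.Str.join " " (y :: z :: r)).toList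
          = y.toList ++ " ".toList ++ (PySem.Str.join " " (z :: r)).toList := by
        simp [PySem.Str.toList_join, PySem.Chars.join_cons_cons]
      rw [h1, ih z]
      show _ = (y ++ pvSufF "" (z :: r)).toList
      have h2 : pvSufF "" (z :: r) = " " ++ z ++ pvSufF "" r := rfl
      simp [h2, String.toList_append, String.append_assoc]

theorem pvJoin_set (xs : List String) : ∀ (j : Nat), j < xs.length → ∀ (v : String),
    PySem.Str.join " " (xs.set j v) = pvPreAcc (xs.take j) ++ v ++ pvSufF "" (xs.drop (j + 1)) := by
  induction xs with
  | nil => intro j hj; simp at hj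
  | cons x t ih =>
      intro j hj v
      cases j with
      | zero =>
          rw [List.set_cons_zero, pvJoin_cons]
          simp [pvPreAcc, String.empty_append, String.append_assoc]
      | succ j =>
          rw [List.set_cons_succ]
          simp only [List.length_cons] at hj
          have hne : t.set j v ≠ [] := by
            have : (t.set j v).length = t.length := by simp
            intro hnil; rw [hnil] at this; simp at this; omega
          obtain ⟨z, r, hzr⟩ := List.exists_cons_of_ne_nil hne
          have hcc : PySem.Str.join " " (x :: t.set j v) = x ++ " " ++ PySem.Str.join " " (t.set j v) := by
            apply pvStrExt
            rw [hzr]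
            simp [PySem.Str.toList_join, PySem.Chars.join_cons_cons, String.toList_append, String.append_assoc]
          rw [hcc, ih j (by omega) v, List.take_succ_cons, List.drop_succ_cons, pvPreAcc_cons]
          simp [String.append_assoc]

theorem pvJoin_split (xs : List String) (j : Nat) (hj : j < xs.length) :
    PySem.Str.join " " xs = pvPreAcc (xs.take j) ++ xs[j] ++ pvSufF "" (xs.drop (j + 1)) := by
  have := pvJoin_set xs j hj xs[j]
  rwa [List.set_getElem_self] at this

-- the two loop bodies agree on every in-range answer
theorem pvStep_eq (sents : List String) (inputs : List (List (String × String))) (p : Int × String)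
    (h1 : -(sents.length : Int) ≤ p.1) (h2 : p.1 < (sents.length : Int)) :
    pvAStep sents inputs p = pvBStep sents (PySem.Str.join " " sents) (pvStarts sents) inputs p := by
  obtain ⟨jn, hjn, hidx⟩ := pvIdx_norm sents.length p.1 h1 h2
  unfold pvAStep pvBStep
  simp only []
  rw [pvGetD_norm sents p.1 "" jn hidx hjn]
  set sent := sents[jn] with hsent
  set a := PySem.Str.strip p.2 with ha
  have hcond : (PySem.Str.isIn a sent = false) ↔ (PySem.Str.find sent a = -1) := by
    rw [PySem.Str.find_eq_neg_one_iff]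
    constructor
    · intro h; exact (PySem.Chars.isIn_eq_false_iff _ _).mp h
    · intro h; exact (PySem.Chars.isIn_eq_false_iff _ _).mpr h
  by_cases hc : PySem.Str.isIn a sent = false
  · rw [if_pos hc, if_pos (hcond.mp hc)]
  · rw [if_neg hc, if_neg (fun hf => hc (hcond.mpr hf))]
    congr 1
    congr 3
    -- the source_text strings agree
    -- abbreviations
    set u := pvPreAcc (sents.take jn) with hu
    set w := pvSufF "" (sents.drop (jn + 1)) with hw
    set j : Int := PySem.Str.find sent a with hjdef
    have hinfix : a.toList <:+: sent.toList := by
      have h : PySem.Str.isIn a sent = true := by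
        cases hb : PySem.Str.isIn a sent with
        | false => exact absurd hb hc
        | true => rfl
      exact (PySem.Str.isIn_iff_infix a sent).mp h
    have hj0 : 0 ≤ j := by
      rw [hjdef, PySem.Str.find_eq]
      exact (PySem.Chars.find_nonneg_iff _ _).mpr hinfix
    have hjfind : j = PySem.Chars.find sent.toList a.toList := by
      rw [hjdef, PySem.Str.find_eq]
    have hjle : j.toNat + a.toList.length ≤ sent.toList.length := by
      have hspec := (PySem.Chars.find_spec (s := sent.toList) (sub := a.toList) (by rw [← hjfind]; exact hj0)).1
      have := hspec.length_le
      rw [← hjfind] at this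
      simp only [List.length_drop] at this
      have hle : j.toNat ≤ sent.toList.length := by
        have := PySem.Chars.find_le_length sent.toList a.toList
        rw [← hjfind] at this
        omega
      omega
    have hfull : PySem.Str.join " " sents = u ++ sent ++ w := pvJoin_split sents jn hjn
    have hstarts : PySem.List.pyGetD (pvStarts sents) p.1 0 = (u.toList.length : Int) := by
      have hidx' : PySem.List.pyIdx? (pvStarts sents).length p.1 = some jn := by
        rw [pvStarts_len]; exact hidx
      unfold PySem.List.pyGetD PySem.List.pyGet?
      rw [hidx']
      simp [pvStarts_get sents jn hjn, hu]
    -- slice the precomputed join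
    have hK1 : PySem.Str.slice (PySem.Str.join " " sents) none (some (PySem.List.pyGetD (pvStarts sents) p.1 0 + j))
        = u ++ PySem.Str.slice sent none (some j) := by
      apply pvStrExt
      rw [hstarts, hfull]
      simp only [PySem.Str.toList_slice, PySem.Chars.slice_eq_listSlice, String.toList_append]
      rw [PySem.List.slice_to _ (by omega), PySem.List.slice_to _ hj0]
      rw [show ((u.toList.length : Int) + j).toNat = u.toList.length + j.toNat by omega]
      rw [List.append_assoc, List.take_append]
      rw [List.take_of_length_le (by omega), Nat.add_sub_cancel_left,
          List.take_append_of_le_length (by omega)]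
    have hK2 : PySem.Str.slice (PySem.Str.join " " sents) (some (PySem.List.pyGetD (pvStarts sents) p.1 0 + j + PySem.Str.len a)) none
        = PySem.Str.slice sent (some (j + PySem.Str.len a)) none ++ w := by
      apply pvStrExt
      rw [hstarts, hfull]
      simp only [PySem.Str.toList_slice, PySem.Chars.slice_eq_listSlice, String.toList_append]
      rw [PySem.List.slice_from _ (by rw [PySem.Str.len_eq]; omega),
          PySem.List.slice_from _ (by rw [PySem.Str.len_eq]; omega)]
      rw [show ((u.toList.length : Int) + j + PySem.Str.len a).toNat
            = u.toList.length + (j + PySem.Str.len a).toNat by rw [PySem.Str.len_eq]; omega]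
      rw [List.append_assoc, List.drop_append]
      rw [List.drop_of_length_le (by omega), Nat.add_sub_cancel_left, List.nil_append,
          List.drop_append_of_le_length (by rw [PySem.Str.len_eq]; omega)]
    rw [hK1, hK2]
    rw [pvSetD_norm sents p.1 _ jn hidx, pvJoin_set sents jn hjn]
    rw [← hu, ← hw]
    simp [String.append_assoc]

-- ===== VERDICT (by name: the statement is the Claim_ definition above) =====
theorem prepare_inputs_for_qg_from_answers_hl_py_spec : Claim_equal_prepare_inputs_for_qg_from_answers_hl_py := by
  intro sents answers _hdom hpre
  unfold Spec_prepare_inputs_for_qg_from_answers_hl_py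
  unfold prepare_inputs_for_qg_from_answers_hl_py prepare_inputs_for_qg_from_answers_hl_py_alt
  exact PySem.List.foldl_congr_mem answers _ _ []
    (fun acc p hp => pvStep_eq sents acc p (hpre p hp).1 (hpre p hp).2)
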